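-- pv_equiv track=rewrite | github.com/sharwood33s/Local_AI_Meetingtool | Local_AI_Meetingtool-v4.py | build_initial_prompt
-- ===== SOURCE A (Python) =====
-- def build_initial_prompt(hint_words, max_chars=1200):
--     # Whisperの初期プロンプトが長くなりすぎないように先頭から一定量だけ渡す
--     selected_words = []
--     current_length = 0
--
--     for word in hint_words:
--         addition = len(word) + (2 if selected_words else 0)
--         if current_length + addition > max_chars:
--             break
--         selected_words.append(word)
--         current_length += addition
--
--     return ", ".join(selected_words) if selected_words else None
-- ===== SOURCE B (Python) =====
-- def build_initial_prompt(hint_words, max_chars=1200):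
--     # Table-then-cutoff: build the running join-length table (stopping once it
--     # exceeds the budget), then slice off the within-budget prefix.
--     words = []
--     cums = []
--     running = 0
--     for w in hint_words:
--         running += len(w) + (2 if cums else 0)
--         words.append(w)
--         cums.append(running)
--         if running > max_chars:
--             break
--     k = sum(1 for c in cums if c <= max_chars)
--     return ", ".join(words[:k]) if k else None
-- ===== Notes on version B (the rewrite author's own statement) =====
-- stated objective: alternative
-- what changed: Replaces the accumulate-and-break selection loop with a two-phase decomposition: first build a cumulative join-length table (stopping once past budget), then pick the cutoff count k of within-budget entries and join the first k words.
import Mathlib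
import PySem

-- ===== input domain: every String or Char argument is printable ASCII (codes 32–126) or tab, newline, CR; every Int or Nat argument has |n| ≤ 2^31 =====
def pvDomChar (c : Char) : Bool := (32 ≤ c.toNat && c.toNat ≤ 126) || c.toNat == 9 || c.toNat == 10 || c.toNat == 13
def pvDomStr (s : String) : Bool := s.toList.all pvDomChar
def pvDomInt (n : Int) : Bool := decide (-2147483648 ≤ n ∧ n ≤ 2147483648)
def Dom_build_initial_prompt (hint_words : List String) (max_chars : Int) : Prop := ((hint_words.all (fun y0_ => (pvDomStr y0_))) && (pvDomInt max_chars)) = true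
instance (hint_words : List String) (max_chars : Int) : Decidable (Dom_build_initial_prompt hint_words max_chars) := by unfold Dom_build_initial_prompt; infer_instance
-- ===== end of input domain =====

-- B replaces A's accumulate-and-break loop by a cumulative-length table plus a
-- within-budget cutoff count (objective: alternative decomposition, same cost).

-- ===== PORT A =====
-- A's loop: accumulate selected words, break when the next addition exceeds the budget.
def bipLoopA (max_chars : Int) : List String → List String → Int → List String
  | [], selected, _ => selected
  | w :: rest, selected, current =>
      let addition : Int := PySem.Str.len w + (if selected.isEmpty then 0 else 2)
      if current + addition > max_chars then selected
      else bipLoopA max_chars rest (selected ++ [w]) (current + addition)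

def build_initial_prompt (hint_words : List String) (max_chars : Int) : Option String :=
  let selected := bipLoopA max_chars hint_words [] 0
  if selected.isEmpty then none else some (PySem.Str.join ", " selected)

-- ===== PORT B =====
-- B phase 1: collect the words seen and the running join-length table, stopping once past budget.
def bipTable (max_chars : Int) : List String → List String → List Int → Int → List String × List Int
  | [], words, cums, _ => (words, cums)
  | w :: rest, words, cums, running =>
      let running' : Int := running + PySem.Str.len w + (if cums.isEmpty then 0 else 2)
      let words' := words ++ [w]
      let cums' := cums ++ [running']
      if running' > max_chars then (words', cums')
      else bipTable max_chars rest words' cums' running'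

def build_initial_prompt_alt (hint_words : List String) (max_chars : Int) : Option String :=
  let t := bipTable max_chars hint_words [] [] 0
  let k := (t.2.filter (fun c => c ≤ max_chars)).length
  if k = 0 then none else some (PySem.Str.join ", " (t.1.take k))

-- ===== PRECONDITION & SPEC =====
def Spec_build_initial_prompt (hint_words : List String) (max_chars : Int) (out : Option String) : Prop := out = build_initial_prompt_alt hint_words max_chars
instance (hint_words : List String) (max_chars : Int) (out : Option String) : Decidable (Spec_build_initial_prompt hint_words max_chars out) := by unfold Spec_build_initial_prompt; infer_instance

-- ===== CLAIM (what is proved, stated in full; the proofs are below) =====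
def Claim_equal_build_initial_prompt : Prop := ∀ (hint_words : List String) (max_chars : Int), Dom_build_initial_prompt hint_words max_chars → Spec_build_initial_prompt hint_words max_chars (build_initial_prompt hint_words max_chars)

-- ===== LEMMAS AND PROOFS =====

-- Loop invariant: with equal-length state (selected = words, one cum per word, all
-- recorded cums within budget), B's table determines A's selection: A's result is
-- the first-k slice of B's words, where k counts the within-budget cums, and the
-- final words/cums have equal length.
theorem bip_invariant (max_chars : Int) (ws : List String) :
    ∀ (sel : List String) (cums : List Int) (cur : Int),
      sel.length = cums.length →
      (∀ c ∈ cums, c ≤ max_chars) →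
      bipLoopA max_chars ws sel cur
        = (bipTable max_chars ws sel cums cur).1.take
            (((bipTable max_chars ws sel cums cur).2.filter (fun c => c ≤ max_chars)).length)
      ∧ (bipTable max_chars ws sel cums cur).1.length
        = (bipTable max_chars ws sel cums cur).2.length := by
  induction ws with
  | nil =>
      intro sel cums cur hlen hle
      simp only [bipLoopA, bipTable]
      have hfilter : cums.filter (fun c => c ≤ max_chars) = cums := by
        apply List.filter_eq_self.mpr
        intro c hc; simpa using hle c hc
      constructor
      · rw [hfilter, ← hlen, List.take_length]
      · exact hlen
  | cons w rest ih =>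
      intro sel cums cur hlen hle
      simp only [bipLoopA, bipTable]
      have hempty : sel.isEmpty = cums.isEmpty := by
        rcases sel with _ | _ <;> rcases cums with _ | _ <;> simp_all
      rw [hempty]
      by_cases hgt : cur + (PySem.Str.len w + (if cums.isEmpty then 0 else 2)) > max_chars
      · have hgt' : cur + PySem.Str.len w + (if cums.isEmpty then 0 else 2) > max_chars := by
          omega
        simp only [hgt, hgt', if_pos]
        have hnle : ¬ (cur + PySem.Str.len w + (if cums.isEmpty then 0 else 2)) ≤ max_chars := by
          omega
        have hfilter : (cums ++ [cur + PySem.Str.len w + (if cums.isEmpty then 0 else 2)]).filter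
            (fun c => c ≤ max_chars) = cums := by
          rw [List.filter_append]
          simp only [List.filter_cons, List.filter_nil, decide_eq_true_eq, hnle, if_false,
            List.append_nil]
          apply List.filter_eq_self.mpr
          intro c hc; simpa using hle c hc
        constructor
        · rw [hfilter, ← hlen, List.take_append_of_le_length (le_refl _), List.take_length]
        · simp [hlen]
      · have hgt' : ¬ (cur + PySem.Str.len w + (if cums.isEmpty then 0 else 2) > max_chars) := by
          omega
        simp only [hgt, hgt', if_neg, not_false_iff]
        have h1 : (sel ++ [w]).length
            = (cums ++ [cur + PySem.Str.len w + (if cums.isEmpty then 0 else 2)]).length := by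
          simp [hlen]
        have h2 : ∀ c ∈ cums ++ [cur + PySem.Str.len w + (if cums.isEmpty then 0 else 2)],
            c ≤ max_chars := by
          intro c hc
          rcases List.mem_append.mp hc with h | h
          · exact hle c h
          · rw [List.mem_singleton] at h; subst h; omega
        have hIH := ih (sel ++ [w])
          (cums ++ [cur + PySem.Str.len w + (if cums.isEmpty then 0 else 2)])
          (cur + PySem.Str.len w + (if cums.isEmpty then 0 else 2)) h1 h2
        have heq : cur + (PySem.Str.len w + (if cums.isEmpty then 0 else 2))
            = cur + PySem.Str.len w + (if cums.isEmpty then 0 else 2) := by ring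
        rw [heq]
        exact hIH

-- ===== VERDICT (by name: the statement is the Claim_ definition above) =====
theorem build_initial_prompt_spec : Claim_equal_build_initial_prompt := by
  intro hint_words max_chars _
  unfold Spec_build_initial_prompt
  obtain ⟨h1, h2⟩ := bip_invariant max_chars hint_words [] [] 0 rfl (by simp)
  simp only [build_initial_prompt, build_initial_prompt_alt]
  rw [h1]
  generalize bipTable max_chars hint_words [] [] 0 = t at h2 ⊢
  generalize hK : (List.filter (fun c => decide (c ≤ max_chars)) t.2).length = k at ⊢
  have hkle : k ≤ t.2.length := hK ▸ List.length_filter_le _ _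
  by_cases hk0 : k = 0
  · subst hk0; simp
  · have hne : ¬ (List.take k t.1).isEmpty = true := by
      rw [List.isEmpty_iff, List.take_eq_nil_iff]
      rintro (h | h)
      · exact hk0 h
      · rw [h] at h2
        simp at h2
        omega
    simp [hk0, hne]
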